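-- pv_equiv track=rewrite | github.com/CodeWellington/Coding | Python/Multiple Host Config Builder.py | config_gen
-- ===== SOURCE A (Python) =====
-- def config_gen(config, hostnames):
--     # Building the configuration
--     full_config = []
--     for host in hostnames:
--         full_config.append("#"*60 + "\n")
--         full_config.append("{:!^60}".format(host) + "\n")
--         full_config.append("#" * 60 + "\n")
--         for line in config:
--             full_config.append(line + "\n")
--     return full_config
-- ===== SOURCE B (Python) =====
-- def config_gen(config, hostnames):
--     # Closed-form construction: output position i determines its content by
--     # index arithmetic on i (quotient = host, remainder = line within the
--     # host's block), looked up in a newline-suffixed table, instead of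
--     # nested append loops re-concatenating every line.
--     per = 3 + len(config)
--     sep = "#" * 60 + "\n"
--     tails = [line + "\n" for line in config]
--     return [sep if (r := i % per) == 0 or r == 2
--             else "{:!^60}".format(hostnames[i // per]) + "\n" if r == 1
--             else tails[r - 3]
--             for i in range(per * len(hostnames))]
-- ===== Notes on version B (the rewrite author's own statement) =====
-- stated objective: alternative
-- what changed: B replaces A's nested append loops by a closed-form construction: the output has (3+len(config))*len(hostnames) positions and the content of position i is computed directly from divmod(i, 3+len(config)), looking the config lines up in a newline-suffixed table built once.
import Mathlib
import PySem

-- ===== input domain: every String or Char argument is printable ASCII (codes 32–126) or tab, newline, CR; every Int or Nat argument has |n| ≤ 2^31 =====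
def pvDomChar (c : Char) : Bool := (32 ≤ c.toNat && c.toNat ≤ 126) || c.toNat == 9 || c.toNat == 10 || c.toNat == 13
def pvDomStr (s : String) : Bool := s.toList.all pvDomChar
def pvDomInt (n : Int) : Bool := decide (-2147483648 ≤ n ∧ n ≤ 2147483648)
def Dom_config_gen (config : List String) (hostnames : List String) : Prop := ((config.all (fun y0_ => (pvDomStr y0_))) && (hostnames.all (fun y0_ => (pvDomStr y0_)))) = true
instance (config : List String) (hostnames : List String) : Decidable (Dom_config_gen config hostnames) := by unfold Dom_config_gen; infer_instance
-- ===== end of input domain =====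

-- B builds the output by closed-form index arithmetic (divmod on the flat position)
-- instead of A's nested append loops; same return value (objective: alternative).


-- ===== PORT A =====
-- "{:!^60}".format(host): centre host in width 60, fill '!', extra fill on the right
-- (exact on the ASCII domain, where Python's len = toList.length). Shared by both ports,
-- since both Pythons call the same format built-in.
def pyCenterBang (cs : List Char) (w : Nat) : List Char :=
  if w ≤ cs.length then cs
  else
    let pad := w - cs.length
    let left := pad / 2
    List.replicate left '!' ++ cs ++ List.replicate (pad - left) '!'

def config_gen (config : List String) (hostnames : List String) : List String :=
  hostnames.foldl (fun full_config host =>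
    let full_config := full_config ++ [String.ofList (List.replicate 60 '#' ++ ['\n'])]
    let full_config := full_config ++ [String.ofList (pyCenterBang host.toList 60 ++ ['\n'])]
    let full_config := full_config ++ [String.ofList (List.replicate 60 '#' ++ ['\n'])]
    config.foldl (fun acc line => acc ++ [String.ofList (line.toList ++ ['\n'])]) full_config) []

-- ===== PORT B =====
-- The comprehension element of Source B as a helper (per = 3 + len(config), tails = the
-- newline-suffixed config table); hostnames[q] and tails[r-3] are always in range, ported as getD.
def pieceB (per : Nat) (hostnames : List String) (tails : List String) (i : Nat) : String :=
  if i % per = 0 ∨ i % per = 2 then String.ofList (List.replicate 60 '#' ++ ['\n'])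
  else if i % per = 1 then
    String.ofList (pyCenterBang (hostnames.getD (i / per) "").toList 60 ++ ['\n'])
  else tails.getD (i % per - 3) ""

def config_gen_alt (config : List String) (hostnames : List String) : List String :=
  let per := 3 + config.length
  let tails := config.map (fun line => String.ofList (line.toList ++ ['\n']))
  (List.range (per * hostnames.length)).map (pieceB per hostnames tails)

-- ===== PRECONDITION & SPEC =====
def Spec_config_gen (config : List String) (hostnames : List String) (out : List String) : Prop := out = config_gen_alt config hostnames
instance (config : List String) (hostnames : List String) (out : List String) : Decidable (Spec_config_gen config hostnames out) := by unfold Spec_config_gen; infer_instance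

-- ===== CLAIM (what is proved, stated in full; the proofs are below) =====
def Claim_equal_config_gen : Prop := ∀ (config : List String) (hostnames : List String), Dom_config_gen config hostnames → Spec_config_gen config hostnames (config_gen config hostnames)

-- ===== LEMMAS AND PROOFS =====

-- A's nested foldl, flattened.
theorem inner_foldl (config : List String) (acc : List String) :
    config.foldl (fun acc line => acc ++ [String.ofList (line.toList ++ ['\n'])]) acc
      = acc ++ config.map (fun line => String.ofList (line.toList ++ ['\n'])) := by
  induction config generalizing acc with
  | nil => simp
  | cons c cs ih =>
      rw [List.foldl_cons, ih, List.map_cons]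
      simp [List.append_assoc]

theorem outer_foldl (config : List String) (hostnames : List String) (acc : List String) :
    hostnames.foldl (fun full_config host =>
      config.foldl (fun acc line => acc ++ [String.ofList (line.toList ++ ['\n'])])
        (full_config ++ [String.ofList (List.replicate 60 '#' ++ ['\n'])]
          ++ [String.ofList (pyCenterBang host.toList 60 ++ ['\n'])]
          ++ [String.ofList (List.replicate 60 '#' ++ ['\n'])])) acc
      = acc ++ hostnames.flatMap (fun host =>
          [String.ofList (List.replicate 60 '#' ++ ['\n']),
           String.ofList (pyCenterBang host.toList 60 ++ ['\n']),
           String.ofList (List.replicate 60 '#' ++ ['\n'])]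
          ++ config.map (fun line => String.ofList (line.toList ++ ['\n']))) := by
  induction hostnames generalizing acc with
  | nil => simp
  | cons h hs ih =>
      rw [List.foldl_cons, inner_foldl, ih]
      simp [List.flatMap_cons]

theorem map_range_getD {α β : Type} (l : List α) (d : α) (f : α → β) :
    (List.range l.length).map (fun i => f (l.getD i d)) = l.map f := by
  induction l with
  | nil => simp
  | cons x xs ih =>
      rw [List.length_cons, List.range_succ_eq_map, List.map_cons, List.map_map]
      simpa using ih

theorem pieceB_shift (per : Nat) (h : String) (hs tails : List String) (i : Nat)
    (hpos : 0 < per) :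
    pieceB per (h :: hs) tails (per + i) = pieceB per hs tails i := by
  unfold pieceB
  rw [Nat.add_mod_left, Nat.add_div_left _ hpos]
  simp

theorem range_map_flatMap (config : List String) (hostnames : List String) :
    (List.range ((3 + config.length) * hostnames.length)).map
        (pieceB (3 + config.length) hostnames
          (config.map (fun line => String.ofList (line.toList ++ ['\n']))))
      = hostnames.flatMap (fun host =>
          [String.ofList (List.replicate 60 '#' ++ ['\n']),
           String.ofList (pyCenterBang host.toList 60 ++ ['\n']),
           String.ofList (List.replicate 60 '#' ++ ['\n'])]
          ++ config.map (fun line => String.ofList (line.toList ++ ['\n']))) := by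
  set tails := config.map (fun line => String.ofList (line.toList ++ ['\n'])) with htails
  have hlen : tails.length = config.length := by simp [htails]
  induction hostnames with
  | nil => simp
  | cons h hs ih =>
      have hsplit : (3 + config.length) * (h :: hs).length
          = (3 + config.length) + (3 + config.length) * hs.length := by
        simp [List.length_cons, Nat.mul_succ, Nat.add_comm]
      rw [hsplit, List.range_add, List.map_append, List.map_map]
      have htail : ((List.range ((3 + config.length) * hs.length)).map
            (pieceB (3 + config.length) (h :: hs) tails ∘ (fun i => (3 + config.length) + i)))
          = (List.range ((3 + config.length) * hs.length)).map
              (pieceB (3 + config.length) hs tails) := by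
        refine List.map_congr_left ?_
        intro i _
        exact pieceB_shift (3 + config.length) h hs tails i (by omega)
      rw [htail, ih]
      -- head segment: range (3 + m) = [0,1,2] ++ (range m).map (3 + ·)
      have hhead : (List.range (3 + config.length)).map
            (pieceB (3 + config.length) (h :: hs) tails)
          = [String.ofList (List.replicate 60 '#' ++ ['\n']),
             String.ofList (pyCenterBang h.toList 60 ++ ['\n']),
             String.ofList (List.replicate 60 '#' ++ ['\n'])] ++ tails := by
        rw [List.range_add, List.map_append, List.map_map]
        have h3 : (List.range 3).map (pieceB (3 + config.length) (h :: hs) tails)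
            = [String.ofList (List.replicate 60 '#' ++ ['\n']),
               String.ofList (pyCenterBang h.toList 60 ++ ['\n']),
               String.ofList (List.replicate 60 '#' ++ ['\n'])] := by
          have e0 : pieceB (3 + config.length) (h :: hs) tails 0
              = String.ofList (List.replicate 60 '#' ++ ['\n']) := by
            unfold pieceB
            simp [Nat.mod_eq_of_lt (show 0 < 3 + config.length by omega)]
          have e1 : pieceB (3 + config.length) (h :: hs) tails 1
              = String.ofList (pyCenterBang h.toList 60 ++ ['\n']) := by
            unfold pieceB
            rw [Nat.mod_eq_of_lt (show 1 < 3 + config.length by omega),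
                Nat.div_eq_of_lt (show 1 < 3 + config.length by omega)]
            simp
          have e2 : pieceB (3 + config.length) (h :: hs) tails 2
              = String.ofList (List.replicate 60 '#' ++ ['\n']) := by
            unfold pieceB
            rw [Nat.mod_eq_of_lt (show 2 < 3 + config.length by omega)]
            simp
          simp [List.range_succ, e0, e1, e2]
        have hrest : (List.range config.length).map
              (pieceB (3 + config.length) (h :: hs) tails ∘ (fun i => 3 + i))
            = tails := by
          have step : ∀ i ∈ List.range config.length,
              (pieceB (3 + config.length) (h :: hs) tails ∘ (fun i => 3 + i)) i
                = tails.getD i "" := by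
            intro i hi
            have hilt : i < config.length := List.mem_range.mp hi
            show pieceB (3 + config.length) (h :: hs) tails (3 + i) = _
            unfold pieceB
            rw [Nat.mod_eq_of_lt (show 3 + i < 3 + config.length by omega)]
            have : ¬ (3 + i = 0 ∨ 3 + i = 2) := by omega
            rw [if_neg this, if_neg (by omega)]
            simp
          rw [List.map_congr_left step, ← hlen]
          simpa using map_range_getD tails "" id
        rw [h3, hrest]
      rw [hhead]
      simp [List.flatMap_cons]

-- ===== VERDICT (by name: the statement is the Claim_ definition above) =====
theorem config_gen_spec : Claim_equal_config_gen := by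
  intro config hostnames _
  show config_gen config hostnames = config_gen_alt config hostnames
  unfold config_gen config_gen_alt
  rw [range_map_flatMap]
  simpa using outer_foldl config hostnames []
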